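-- pv_equiv track=rewrite | github.com/FI86/Boomerang-CEA-20250929 | Corriges/Exercices/ex_wx_calculatrice.py | nettoyer_zeros
-- ===== SOURCE A (Python) =====
-- def nettoyer_zeros(expr):
--     # Operateurs a prendre en compte.
--     operateurs: str = "+-*/"
--     nettoyee: str = ""
--     nombre: str = ""
--
--     # Parcours des caracteres pour separer nombres et operateurs.
--     for ch in expr:
--         if ch in operateurs:
--             if nombre != "":
--                 # Suppression des zeros initiaux pour nombres decimaux.
--                 if "." in nombre:
--                     partie_entiere, partie_decimale = nombre.split(".", 1)
--                     partie_entiere = partie_entiere.lstrip("0") or "0"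
--                     nombre = partie_entiere + "." + partie_decimale
--                 else:
--                     # Suppression des zeros initiaux pour entiers.
--                     nombre = nombre.lstrip("0") or "0"
--
--                 nettoyee += nombre
--                 nombre = ""
--
--             nettoyee += ch
--         else:
--             nombre += ch
--
--     # Traitement du dernier nombre.
--     if nombre != "":
--         if "." in nombre:
--             partie_entiere, partie_decimale = nombre.split(".", 1)
--             partie_entiere = partie_entiere.lstrip("0") or "0"
--             nombre = partie_entiere + "." + partie_decimale
--         else:
--             nombre = nombre.lstrip("0") or "0"
--
--         nettoyee += nombre
--
--     return nettoyee
-- ===== SOURCE B (Python) =====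
-- def nettoyer_zeros(expr):
--     # Streaming two-flag state machine: no number buffer, no split/lstrip;
--     # each character is emitted or dropped on the spot.
--     sortie = []
--     debut = True    # still inside the all-'0' prefix of the current number's integer part
--     zeros = False   # that prefix is nonempty
--     for ch in expr:
--         if ch in "+-*/":
--             if debut and zeros:
--                 sortie.append('0')
--             sortie.append(ch)
--             debut, zeros = True, False
--         elif debut:
--             if ch == '0':
--                 zeros = True
--             elif ch == '.':
--                 sortie.append('0')
--                 sortie.append('.')
--                 debut = False
--             else:
--                 sortie.append(ch)
--                 debut = False
--         else:
--             sortie.append(ch)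
--     if debut and zeros:
--         sortie.append('0')
--     return "".join(sortie)
-- ===== Notes on version B (the rewrite author's own statement) =====
-- stated objective: alternative
-- what changed: Replaces A's buffer-and-flush design (accumulate each number token, then split off the decimal part, strip leading zeros and re-append, with the flush code duplicated at end of string) by a streaming state machine with two boolean flags that emits or drops each character immediately, never building a number buffer or calling split/lstrip.
import Mathlib
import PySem

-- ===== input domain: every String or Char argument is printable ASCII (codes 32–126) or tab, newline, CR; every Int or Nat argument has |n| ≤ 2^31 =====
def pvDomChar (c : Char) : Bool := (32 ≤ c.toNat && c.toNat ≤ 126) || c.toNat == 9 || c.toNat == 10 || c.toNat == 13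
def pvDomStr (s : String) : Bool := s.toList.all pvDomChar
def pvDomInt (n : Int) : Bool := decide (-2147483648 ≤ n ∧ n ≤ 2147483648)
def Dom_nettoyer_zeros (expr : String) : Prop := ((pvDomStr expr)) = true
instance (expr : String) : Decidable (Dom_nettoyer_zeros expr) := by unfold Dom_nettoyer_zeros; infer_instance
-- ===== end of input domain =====

-- B replaces A's buffer-and-flush loop (accumulate a number, split on '.', lstrip, duplicated flush)
-- by a streaming two-flag state machine that emits or drops each character on the spot; same cost.

-- ch in "+-*/"
def pvIsOp (c : Char) : Bool := c == '+' || c == '-' || c == '*' || c == '/'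
-- the character is not the decimal point (predicate of split(".",1))
def pvNotDot (c : Char) : Bool := !(c == '.')

-- ===== PORT A =====
-- A's inline zero-stripping block (appears twice verbatim in the Python):
-- split(".", 1) is ported by hand as takeWhile/dropWhile at the first '.' (exact for a
-- single-char separator); lstrip("0") is dropWhile (· == '0'); `x or "0"` tests x's
-- emptiness, ported as .isEmpty.
def pvCleanA (nombre : List Char) : List Char :=
  if nombre.contains '.' then
    let partie_entiere := nombre.takeWhile pvNotDot
    let partie_decimale := (nombre.dropWhile pvNotDot).drop 1
    (if (partie_entiere.dropWhile (· == '0')).isEmpty then ['0']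
     else partie_entiere.dropWhile (· == '0')) ++ '.' :: partie_decimale
  else
    if (nombre.dropWhile (· == '0')).isEmpty then ['0'] else nombre.dropWhile (· == '0')

def pvLoopA : List Char → List Char → List Char → List Char
  | [], nettoyee, nombre =>
      if nombre = [] then nettoyee else nettoyee ++ pvCleanA nombre
  | ch :: rest, nettoyee, nombre =>
      if pvIsOp ch then
        if nombre ≠ [] then pvLoopA rest (nettoyee ++ pvCleanA nombre ++ [ch]) []
        else pvLoopA rest (nettoyee ++ [ch]) []
      else pvLoopA rest nettoyee (nombre ++ [ch])

def nettoyer_zeros (expr : String) : String :=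
  String.ofList (pvLoopA expr.toList [] [])

-- ===== PORT B =====
-- Source B's loop: `sortie` is the emitted character list, `debut`/`zeros` the two flags;
-- the trailing `if debut and zeros` flush is the base case.
def pvLoopB : List Char → List Char → Bool → Bool → List Char
  | [], sortie, debut, zeros =>
      if debut && zeros then sortie ++ ['0'] else sortie
  | ch :: rest, sortie, debut, zeros =>
      if pvIsOp ch then
        pvLoopB rest ((if debut && zeros then sortie ++ ['0'] else sortie) ++ [ch]) true false
      else if debut then
        if ch == '0' then pvLoopB rest sortie debut true
        else if ch == '.' then pvLoopB rest (sortie ++ ['0', '.']) false zeros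
        else pvLoopB rest (sortie ++ [ch]) false zeros
      else pvLoopB rest (sortie ++ [ch]) debut zeros

def nettoyer_zeros_alt (expr : String) : String :=
  String.ofList (pvLoopB expr.toList [] true false)

-- ===== PRECONDITION & SPEC =====
def Spec_nettoyer_zeros (expr : String) (out : String) : Prop := out = nettoyer_zeros_alt expr
instance (expr : String) (out : String) : Decidable (Spec_nettoyer_zeros expr out) := by unfold Spec_nettoyer_zeros; infer_instance

-- ===== CLAIM (what is proved, stated in full; the proofs are below) =====
def Claim_equal_nettoyer_zeros : Prop := ∀ (expr : String), Dom_nettoyer_zeros expr → Spec_nettoyer_zeros expr (nettoyer_zeros expr)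

-- ===== LEMMAS AND PROOFS =====

-- takeWhile/dropWhile over an append when the whole prefix satisfies p
theorem pv_tw_all {α} (p : α → Bool) (l m : List α) (h : l.all p = true) :
    (l ++ m).takeWhile p = l ++ m.takeWhile p := by
  induction l with
  | nil => simp
  | cons a t ih =>
    simp only [List.all_cons, Bool.and_eq_true] at h
    simp only [List.cons_append, List.takeWhile_cons, h.1, if_true, ih h.2]

theorem pv_dw_all {α} (p : α → Bool) (l m : List α) (h : l.all p = true) :
    (l ++ m).dropWhile p = m.dropWhile p := by
  induction l with
  | nil => simp
  | cons a t ih =>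
    simp only [List.all_cons, Bool.and_eq_true] at h
    simp only [List.cons_append, List.dropWhile_cons, h.1, if_true, ih h.2]

-- takeWhile/dropWhile over an append when the prefix already contains a failing element
theorem pv_dw_ne {α} (p : α → Bool) (l m : List α) (h : l.dropWhile p ≠ []) :
    (l ++ m).dropWhile p = l.dropWhile p ++ m := by
  induction l with
  | nil => simp at h
  | cons a t ih =>
    by_cases hp : p a = true
    · simp only [List.dropWhile_cons, hp, if_true] at h
      simp only [List.cons_append, List.dropWhile_cons, hp, if_true]
      exact ih h
    · have hp' : p a = false := by simpa using hp
      simp [List.dropWhile_cons, hp']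

theorem pv_tw_ne {α} (p : α → Bool) (l m : List α) (h : l.dropWhile p ≠ []) :
    (l ++ m).takeWhile p = l.takeWhile p := by
  induction l with
  | nil => simp at h
  | cons a t ih =>
    by_cases hp : p a = true
    · simp only [List.dropWhile_cons, hp, if_true] at h
      simp only [List.cons_append, List.takeWhile_cons, hp, if_true, ih h]
    · have hp' : p a = false := by simpa using hp
      simp [List.takeWhile_cons, hp']

-- facts about all-'0' lists
theorem pv_zeros_mem (n : List Char) (h : n.all (· == '0') = true) :
    ∀ x ∈ n, x = '0' := by
  intro x hx
  have := (List.all_eq_true.mp h) x hx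
  simpa using this

theorem pv_zeros_nmem (n : List Char) (h : n.all (· == '0') = true) : '.' ∉ n :=
  fun hm => by simpa using pv_zeros_mem n h '.' hm

theorem pv_zeros_dw (n : List Char) (h : n.all (· == '0') = true) :
    n.dropWhile (· == '0') = [] := by
  induction n with
  | nil => simp
  | cons a t ih =>
    simp only [List.all_cons, Bool.and_eq_true] at h
    simp [List.dropWhile_cons, h.1, ih h.2]

theorem pv_zeros_notdot (n : List Char) (h : n.all (· == '0') = true) :
    n.all pvNotDot = true := by
  rw [List.all_eq_true]
  intro x hx
  rw [pv_zeros_mem n h x hx]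
  decide

-- if '.' occurs in n, dropWhile pvNotDot n starts with '.'
theorem pv_dot_cons (n : List Char) (hmem : '.' ∈ n) :
    ∃ t, n.dropWhile pvNotDot = '.' :: t := by
  induction n with
  | nil => simp at hmem
  | cons a s ih =>
    by_cases ha : a = '.'
    · subst ha
      exact ⟨s, by simp [List.dropWhile_cons, pvNotDot]⟩
    · have hpa : pvNotDot a = true := by simp [pvNotDot, ha]
      have hmem' : '.' ∈ s := by
        rcases List.mem_cons.mp hmem with h' | h'
        · exact absurd h'.symm ha
        · exact h'
      obtain ⟨t, ht⟩ := ih hmem'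
      exact ⟨t, by simpa [List.dropWhile_cons, hpa] using ht⟩

-- flushing an all-'0' nonempty number yields "0"
theorem pv_clean_zeros (n : List Char) (h : n.all (· == '0') = true) :
    pvCleanA n = ['0'] := by
  simp [pvCleanA, pv_zeros_dw n h, pv_zeros_nmem n h]

-- flushing zeros ++ "." yields "0."
theorem pv_clean_zeros_dot (n : List Char) (h : n.all (· == '0') = true) :
    pvCleanA (n ++ ['.']) = ['0', '.'] := by
  have htw : (n ++ ['.']).takeWhile pvNotDot = n := by
    rw [pv_tw_all pvNotDot n ['.'] (pv_zeros_notdot n h)]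
    simp [List.takeWhile_cons, pvNotDot]
  have hdw : (n ++ ['.']).dropWhile pvNotDot = ['.'] := by
    rw [pv_dw_all pvNotDot n ['.'] (pv_zeros_notdot n h)]
    simp [List.dropWhile_cons, pvNotDot]
  simp [pvCleanA, htw, hdw, pv_zeros_dw n h]

-- flushing zeros ++ [c] (c not '0', not '.') yields [c]
theorem pv_clean_zeros_other (n : List Char) (c : Char) (h : n.all (· == '0') = true)
    (hc0 : (c == '0') = false) (hcd : (c == '.') = false) :
    pvCleanA (n ++ [c]) = [c] := by
  have hcd3 : '.' ≠ c := fun h' => by simp [← h'] at hcd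
  have hdw : (n ++ [c]).dropWhile (· == '0') = [c] := by
    rw [pv_dw_all (· == '0') n [c] h]
    simp [List.dropWhile_cons, hc0]
  simp [pvCleanA, hdw, pv_zeros_nmem n h, hcd3]

-- the flush commutes with appending one more character once the number is not all-'0'
theorem pv_clean_append (n : List Char) (c : Char) (h : n.all (· == '0') = false) :
    pvCleanA (n ++ [c]) = pvCleanA n ++ [c] := by
  by_cases hdot : n.contains '.' = true
  · have hmem : '.' ∈ n := by simpa using hdot
    obtain ⟨t, ht⟩ := pv_dot_cons n hmem
    have hne : n.dropWhile pvNotDot ≠ [] := by rw [ht]; simp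
    simp [pvCleanA, hmem, pv_tw_ne pvNotDot n [c] hne, pv_dw_ne pvNotDot n [c] hne, ht]
  · have hmem : '.' ∉ n := by simpa using hdot
    have hnz : n.dropWhile (· == '0') ≠ [] := by
      intro hnil
      have hall : n.all (· == '0') = true := by
        rw [List.all_eq_true]
        intro x hx
        have := List.dropWhile_eq_nil_iff.mp hnil x hx
        simpa using this
      simp [hall] at h
    by_cases hc : c = '.'
    · subst hc
      have hall : n.all pvNotDot = true := by
        rw [List.all_eq_true]
        intro x hx
        simp only [pvNotDot, Bool.not_eq_eq_eq_not, Bool.not_true]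
        rw [beq_eq_false_iff_ne]
        rintro rfl
        exact hmem hx
      have htw : (n ++ ['.']).takeWhile pvNotDot = n := by
        rw [pv_tw_all pvNotDot n ['.'] hall]
        simp [List.takeWhile_cons, pvNotDot]
      have hdw : (n ++ ['.']).dropWhile pvNotDot = ['.'] := by
        rw [pv_dw_all pvNotDot n ['.'] hall]
        simp [List.dropWhile_cons, pvNotDot]
      simp [pvCleanA, hmem, htw, hdw, hnz]
    · have hcd3 : '.' ≠ c := fun h' => hc h'.symm
      have hdwc : (n ++ [c]).dropWhile (· == '0') = n.dropWhile (· == '0') ++ [c] :=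
        pv_dw_ne (· == '0') n [c] hnz
      simp [pvCleanA, hmem, hcd3, hdwc, hnz]

-- not-all-'0' is preserved by appending
theorem pv_all_append_false (n : List Char) (c : Char) (h : n.all (· == '0') = false) :
    (n ++ [c]).all (· == '0') = false := by
  simp only [List.all_append, Bool.and_eq_false_iff]
  exact Or.inl h

-- the main invariant: A's loop state (nettoyee, nombre) corresponds to B's state
-- (sortie, debut, zeros): while nombre is all-'0', B has emitted nothing for it and
-- debut=true, zeros=(nombre ≠ []); once it is not, B has already emitted its flush.
theorem pv_main (s : List Char) : ∀ (out nombre : List Char),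
    (nombre.all (· == '0') = true →
       pvLoopA s out nombre = pvLoopB s out true (!nombre.isEmpty)) ∧
    (nombre.all (· == '0') = false → ∀ z,
       pvLoopA s out nombre = pvLoopB s (out ++ pvCleanA nombre) false z) := by
  induction s with
  | nil =>
    intro out nombre
    constructor
    · intro h
      by_cases hn : nombre = []
      · subst hn; simp [pvLoopA, pvLoopB]
      · have : nombre.isEmpty = false := by simpa [List.isEmpty_iff] using hn
        simp [pvLoopA, pvLoopB, hn, this, pv_clean_zeros nombre h]
    · intro h z
      have hn : nombre ≠ [] := by rintro rfl; simp at h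
      simp [pvLoopA, pvLoopB, hn]
  | cons ch rest ih =>
    intro out nombre
    by_cases hop : pvIsOp ch = true
    · constructor
      · intro h
        by_cases hn : nombre = []
        · subst hn
          simp only [pvLoopA, pvLoopB, hop, if_true, ne_eq, not_true_eq_false, if_false,
            List.isEmpty_nil, Bool.not_true, Bool.and_false, Bool.false_eq_true]
          exact (ih (out ++ [ch]) []).1 rfl
        · have hne : nombre.isEmpty = false := by simpa [List.isEmpty_iff] using hn
          simp only [pvLoopA, pvLoopB, hop, if_true, ne_eq, hn, not_false_eq_true,
            hne, Bool.not_false, Bool.and_true, pv_clean_zeros nombre h]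
          have := (ih (out ++ ['0'] ++ [ch]) []).1 rfl
          simpa [List.append_assoc] using this
      · intro h z
        have hn : nombre ≠ [] := by rintro rfl; simp at h
        simp only [pvLoopA, pvLoopB, hop, if_true, ne_eq, hn, not_false_eq_true,
          Bool.false_and, Bool.false_eq_true, if_false]
        have := (ih (out ++ pvCleanA nombre ++ [ch]) []).1 rfl
        simpa [List.append_assoc] using this
    · have hop' : pvIsOp ch = false := by simpa using hop
      constructor
      · intro h
        by_cases hc0 : ch = '0'
        · subst hc0
          simp only [pvLoopA, pvLoopB, hop', Bool.false_eq_true, if_false, if_true,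
            beq_self_eq_true]
          have hall : (nombre ++ ['0']).all (· == '0') = true := by simp [h]
          have he : (!(nombre ++ ['0']).isEmpty) = true := by simp [List.isEmpty_iff]
          have := (ih out (nombre ++ ['0'])).1 hall
          rw [he] at this
          exact this
        · have hc0' : (ch == '0') = false := by simpa using hc0
          by_cases hcd : ch = '.'
          · subst hcd
            simp only [pvLoopA, pvLoopB, hop', Bool.false_eq_true, if_false, if_true,
              hc0', beq_self_eq_true]
            have hallf : ((nombre ++ ['.']).all (· == '0')) = false := by simp
            have := (ih out (nombre ++ ['.'])).2 hallf (!nombre.isEmpty)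
            rw [this, pv_clean_zeros_dot nombre h]
          · have hcd' : (ch == '.') = false := by simpa using hcd
            simp only [pvLoopA, pvLoopB, hop', Bool.false_eq_true, if_false, if_true,
              hc0', hcd']
            have hallf : ((nombre ++ [ch]).all (· == '0')) = false := by simp [hc0']
            have := (ih out (nombre ++ [ch])).2 hallf (!nombre.isEmpty)
            rw [this, pv_clean_zeros_other nombre ch h hc0' hcd']
      · intro h z
        simp only [pvLoopA, pvLoopB, hop', Bool.false_eq_true, if_false]
        have := (ih out (nombre ++ [ch])).2 (pv_all_append_false nombre ch h) z
        rw [this, pv_clean_append nombre ch h, List.append_assoc]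

-- ===== VERDICT (by name: the statement is the Claim_ definition above) =====
theorem nettoyer_zeros_spec : Claim_equal_nettoyer_zeros := by
  intro expr _
  unfold Spec_nettoyer_zeros nettoyer_zeros nettoyer_zeros_alt
  rw [(pv_main expr.toList [] []).1 rfl]
  simp
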